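-- pv_equiv track=rewrite | github.com/kwiilh9013/MyDev | pgc_survive_mod/behavior_pack_survive/ScukeSurviveScript/modServer/tasks/boxCheckTask.py | _BuildBoxedPosList
-- ===== SOURCE A (Python) =====
-- def _BuildBoxedPosList(s):
-- 	map = []
-- 	r = range(-s, s + 1)
-- 	for i in r:
-- 		for j in r:
-- 			for k in r:
-- 				pos = (i, j, k)
-- 				layer = max(abs(i), abs(j), abs(k))
-- 				while len(map) <= layer:
-- 					map.append([])
-- 				map[layer].append(pos)
-- 	return map
-- ===== SOURCE B (Python) =====
-- def _BuildBoxedPosList(s):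
--     out = []
--     for l in range(s + 1):
--         layer = []
--         e = range(-l, l + 1)
--         for i in e:
--             if abs(i) == l:
--                 for j in e:
--                     for k in e:
--                         layer.append((i, j, k))
--             else:
--                 for j in e:
--                     if abs(j) == l:
--                         for k in e:
--                             layer.append((i, j, k))
--                     else:
--                         layer.append((i, j, -l))
--                         layer.append((i, j, l))
--         out.append(layer)
--     return out
-- ===== Notes on version B (the rewrite author's own statement) =====
-- stated objective: alternative
-- what changed: A makes one pass over the whole cube, growing a list of layer buckets on demand and scattering each position into its bucket; B builds each Chebyshev layer 0..s directly by enumerating that shell (full square on boundary i, boundary rows and the two k-endpoints inside), never touching other layers.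
import Mathlib
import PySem

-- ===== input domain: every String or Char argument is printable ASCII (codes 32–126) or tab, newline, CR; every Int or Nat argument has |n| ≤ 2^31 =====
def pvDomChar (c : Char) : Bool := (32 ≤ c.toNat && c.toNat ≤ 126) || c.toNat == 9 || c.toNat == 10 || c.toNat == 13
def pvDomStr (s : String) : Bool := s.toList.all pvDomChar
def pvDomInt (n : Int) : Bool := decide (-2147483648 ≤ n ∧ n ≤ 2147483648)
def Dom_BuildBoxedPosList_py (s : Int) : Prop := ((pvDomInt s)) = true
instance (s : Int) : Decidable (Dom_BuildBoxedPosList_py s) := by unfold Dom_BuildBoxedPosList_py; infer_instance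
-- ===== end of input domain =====

-- A scatters every cube position into an on-demand-grown list of layer buckets in one pass;
-- B instead constructs each Chebyshev shell 0..s directly by boundary-case enumeration (objective: alternative).

-- layer = max(abs(i), abs(j), abs(k))  (shared pure expression of both Pythons)
def chebLayer (p : Int × Int × Int) : Int := max |p.1| (max |p.2.1| |p.2.2|)

-- ===== PORT A =====
-- `while len(map) <= layer: map.append([])`
def padTo (m : List (List (Int × Int × Int))) (layer : Int) : List (List (Int × Int × Int)) :=
  if _h : (m.length : Int) ≤ layer then padTo (m ++ [[]]) layer else m
termination_by (layer + 1 - (m.length : Int)).toNat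
decreasing_by simp only [List.length_append, List.length_cons, List.length_nil]; omega

-- body of the innermost loop: pad, then map[layer].append(pos); layer ≥ 0 so .toNat is exact
def stepA (m : List (List (Int × Int × Int))) (p : Int × Int × Int) :
    List (List (Int × Int × Int)) :=
  (padTo m (chebLayer p)).modify (chebLayer p).toNat (fun row => row ++ [p])

def BuildBoxedPosList_py (s : Int) : List (List (Int × Int × Int)) :=
  (PySem.List.pyRange (-s) (s + 1) 1).foldl (fun m i =>
    (PySem.List.pyRange (-s) (s + 1) 1).foldl (fun m j =>
      (PySem.List.pyRange (-s) (s + 1) 1).foldl (fun m k =>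
        stepA m (i, j, k)) m) m) []

-- ===== PORT B =====
-- the body of B's `for l in range(s + 1)` loop: build layer l's shell directly (e = range(-l, l + 1))
def shell (l : Int) : List (Int × Int × Int) :=
  (PySem.List.pyRange (-l) (l + 1) 1).flatMap (fun i =>
    if |i| == l then
      (PySem.List.pyRange (-l) (l + 1) 1).flatMap (fun j =>
        (PySem.List.pyRange (-l) (l + 1) 1).map (fun k => (i, j, k)))
    else
      (PySem.List.pyRange (-l) (l + 1) 1).flatMap (fun j =>
        if |j| == l then (PySem.List.pyRange (-l) (l + 1) 1).map (fun k => (i, j, k))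
        else [(i, j, -l), (i, j, l)]))

def BuildBoxedPosList_py_alt (s : Int) : List (List (Int × Int × Int)) :=
  (PySem.List.pyRange 0 (s + 1) 1).map shell

-- ===== PRECONDITION & SPEC =====
def Spec_BuildBoxedPosList_py (s : Int) (out : List (List (Int × Int × Int))) : Prop := out = BuildBoxedPosList_py_alt s
instance (s : Int) (out : List (List (Int × Int × Int))) : Decidable (Spec_BuildBoxedPosList_py s out) := by unfold Spec_BuildBoxedPosList_py; infer_instance

-- ===== CLAIM (what is proved, stated in full; the proofs are below) =====
def Claim_equal_BuildBoxedPosList_py : Prop := ∀ (s : Int), Dom_BuildBoxedPosList_py s → Spec_BuildBoxedPosList_py s (BuildBoxedPosList_py s)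

-- ===== LEMMAS AND PROOFS =====

-- the flat enumeration of the cube in A's visit order (proof device linking the two ports)
def cubePts (s : Int) : List (Int × Int × Int) :=
  (PySem.List.pyRange (-s) (s + 1) 1).flatMap (fun i =>
    (PySem.List.pyRange (-s) (s + 1) 1).flatMap (fun j =>
      (PySem.List.pyRange (-s) (s + 1) 1).map (fun k => (i, j, k))))

-- number of buckets A's loop has created after processing ps
def nBuckets (ps : List (Int × Int × Int)) : Nat :=
  ps.foldl (fun n p => max n ((chebLayer p).toNat + 1)) 0

lemma chebLayer_nonneg (p : Int × Int × Int) : 0 ≤ chebLayer p := by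
  simp only [chebLayer]; positivity

lemma padTo_eq (m : List (List (Int × Int × Int))) (layer : Int) :
    padTo m layer = m ++ List.replicate (layer + 1 - (m.length : Int)).toNat [] := by
  fun_induction padTo m layer with
  | case1 m h ih =>
      rw [ih, List.append_assoc]
      congr 1
      have : (layer + 1 - ((m ++ [[]]).length : Int)).toNat + 1
           = (layer + 1 - (m.length : Int)).toNat := by
        simp only [List.length_append, List.length_cons, List.length_nil]; omega
      rw [← this, List.replicate_succ]
      simp
  | case2 m h =>
      have : (layer + 1 - (m.length : Int)).toNat = 0 := by omega
      simp [this]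

lemma mem_lt_nBuckets (ps : List (Int × Int × Int)) :
    ∀ a, a ≤ ps.foldl (fun n p => max n ((chebLayer p).toNat + 1)) a ∧
      ∀ p ∈ ps, (chebLayer p).toNat + 1 ≤ ps.foldl (fun n p => max n ((chebLayer p).toNat + 1)) a := by
  induction ps with
  | nil => simp
  | cons q ps ih =>
      intro a
      refine ⟨?_, ?_⟩
      · have := (ih (max a ((chebLayer q).toNat + 1))).1
        simp only [List.foldl_cons]; omega
      · intro p hp
        rcases List.mem_cons.mp hp with h | h
        · subst h
          have := (ih (max a ((chebLayer p).toNat + 1))).1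
          simp only [List.foldl_cons]; omega
        · exact (ih (max a ((chebLayer q).toNat + 1))).2 p h

lemma filter_eq_nil_of_ge (ps : List (Int × Int × Int)) (t : Nat) (ht : nBuckets ps ≤ t) :
    ps.filter (fun p => chebLayer p == (t : Int)) = [] := by
  rw [List.filter_eq_nil_iff]
  intro p hp
  have h := (mem_lt_nBuckets ps 0).2 p hp
  have h0 := chebLayer_nonneg p
  simp only [beq_iff_eq]
  unfold nBuckets at ht
  omega

lemma buckets_spec (ps : List (Int × Int × Int)) :
    ps.foldl stepA [] =
      (List.range (nBuckets ps)).map (fun (t : Nat) => ps.filter (fun p => chebLayer p == (t : Int))) := by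
  induction ps using List.reverseRecOn with
  | nil => simp [nBuckets]
  | append_singleton ps p ih =>
      have hN : nBuckets (ps ++ [p]) = max (nBuckets ps) ((chebLayer p).toNat + 1) := by
        simp [nBuckets, List.foldl_append]
      have h0 := chebLayer_nonneg p
      set N := nBuckets ps with hNdef
      set L := (chebLayer p).toNat with hLdef
      have hLint : (L : Int) = chebLayer p := by omega
      rw [List.foldl_append, ih]
      simp only [List.foldl_cons, List.foldl_nil]
      -- the padded intermediate state
      have hpad : padTo ((List.range N).map (fun (t : Nat) => ps.filter (fun p => chebLayer p == (t : Int)))) (chebLayer p)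
          = (List.range (max N (L + 1))).map (fun (t : Nat) => ps.filter (fun p => chebLayer p == (t : Int))) := by
        rw [padTo_eq]
        apply List.ext_getElem
        · simp; omega
        · intro i h1 h2
          simp only [List.length_append, List.length_map, List.length_replicate] at h1
          by_cases hi : i < N
          · rw [List.getElem_append_left (by simpa using hi)]
            simp
          · rw [List.getElem_append_right (by simpa using hi)]
            simp only [List.getElem_replicate, List.getElem_map, List.getElem_range]
            exact (filter_eq_nil_of_ge ps i (by omega)).symm
      rw [stepA, hpad, hN]
      apply List.ext_getElem
      · simp [List.length_modify]
      · intro i h1 h2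
        have hi : i < max N (L + 1) := by simpa [List.length_modify] using h1
        rw [List.getElem_modify]
        simp only [List.getElem_map, List.filter_append]
        by_cases hL : L = i
        · subst hL
          simp [← hLint, List.filter]
        · have : ¬ (chebLayer p == (i : Int)) = true := by
            simp only [beq_iff_eq]; omega
          rw [if_neg (by omega)]
          simp [List.filter, this]

lemma nBuckets_cube (s : Int) (hs : 0 ≤ s) : nBuckets (cubePts s) = s.toNat + 1 := by
  have hmem : ∀ p ∈ cubePts s, (chebLayer p).toNat + 1 ≤ s.toNat + 1 := by
    intro p hp
    simp only [cubePts, List.mem_flatMap, List.mem_map, PySem.List.mem_pyRange_one] at hp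
    obtain ⟨i, hi, j, hj, k, hk, rfl⟩ := hp
    have hle : chebLayer (i, j, k) ≤ s := by
      simp only [chebLayer]
      refine max_le ?_ (max_le ?_ ?_) <;> (rw [abs_le]; constructor <;> omega)
    omega
  have hin : (-s, -s, -s) ∈ cubePts s := by
    simp only [cubePts, List.mem_flatMap, List.mem_map, PySem.List.mem_pyRange_one]
    exact ⟨-s, ⟨le_refl _, by omega⟩, -s, ⟨le_refl _, by omega⟩, -s, ⟨le_refl _, by omega⟩, rfl⟩
  have hlow : (chebLayer (-s, -s, -s)).toNat + 1 ≤ nBuckets (cubePts s) :=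
    (mem_lt_nBuckets (cubePts s) 0).2 _ hin
  have hch : chebLayer (-s, -s, -s) = s := by
    have : |(-s)| = s := by rw [abs_neg, abs_of_nonneg hs]
    simp [chebLayer, this]
  have hub : ∀ (l : List (Int × Int × Int)), (∀ p ∈ l, (chebLayer p).toNat + 1 ≤ s.toNat + 1) →
      ∀ a ≤ s.toNat + 1, l.foldl (fun n p => max n ((chebLayer p).toNat + 1)) a ≤ s.toNat + 1 := by
    intro l
    induction l with
    | nil => simp
    | cons q l ih =>
        intro h a ha
        simp only [List.foldl_cons]
        exact ih (fun p hp => h p (List.mem_cons_of_mem _ hp))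
          _ (by have := h q List.mem_cons_self; omega)
  have := hub (cubePts s) hmem 0 (by omega)
  rw [hch] at hlow
  unfold nBuckets
  unfold nBuckets at hlow
  omega

-- drop the (empty) contributions of |i| > l from a flatMap over range(-s, s+1)
lemma flatMap_prune {γ : Type} (s l : Int) (F : Int → List γ) (h0 : 0 ≤ l) (hls : l ≤ s)
    (hF : ∀ i : Int, l < |i| → F i = []) :
    (PySem.List.pyRange (-s) (s + 1) 1).flatMap F = (PySem.List.pyRange (-l) (l + 1) 1).flatMap F := by
  rw [PySem.List.pyRange_one_append (-s) (-l) (s + 1) (by omega) (by omega),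
      PySem.List.pyRange_one_append (-l) (l + 1) (s + 1) (by omega) (by omega),
      List.flatMap_append, List.flatMap_append]
  have h1 : (PySem.List.pyRange (-s) (-l) 1).flatMap F = [] := by
    rw [List.flatMap_eq_nil_iff]
    intro x hx
    rw [PySem.List.mem_pyRange_one] at hx
    exact hF x (by rw [Int.abs_eq_natAbs]; omega)
  have h2 : (PySem.List.pyRange (l + 1) (s + 1) 1).flatMap F = [] := by
    rw [List.flatMap_eq_nil_iff]
    intro x hx
    rw [PySem.List.mem_pyRange_one] at hx
    exact hF x (by rw [Int.abs_eq_natAbs]; omega)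
  simp [h1, h2]

-- a filter by an interval condition cuts a range down to the sub-range
lemma filter_range_interval (a b c d : Int) (p : Int → Bool)
    (hp : ∀ x, p x = true ↔ (c ≤ x ∧ x < d)) (hac : a ≤ c) (hcd : c ≤ d) (hdb : d ≤ b) :
    (PySem.List.pyRange a b 1).filter p = PySem.List.pyRange c d 1 := by
  rw [PySem.List.pyRange_one_append a c b hac (by omega),
      PySem.List.pyRange_one_append c d b hcd hdb,
      List.filter_append, List.filter_append]
  have h1 : (PySem.List.pyRange a c 1).filter p = [] := by
    rw [List.filter_eq_nil_iff]
    intro x hx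
    rw [PySem.List.mem_pyRange_one] at hx
    simp only [hp]; omega
  have h2 : (PySem.List.pyRange c d 1).filter p = PySem.List.pyRange c d 1 := by
    rw [List.filter_eq_self]
    intro x hx
    rw [PySem.List.mem_pyRange_one] at hx
    rw [hp]; omega
  have h3 : (PySem.List.pyRange d b 1).filter p = [] := by
    rw [List.filter_eq_nil_iff]
    intro x hx
    rw [PySem.List.mem_pyRange_one] at hx
    simp only [hp]; omega
  simp [h1, h2, h3]

-- a filter by "x = -l or x = l" (0 < l) cuts a range down to the two endpoints
lemma filter_range_pair (a b l : Int) (p : Int → Bool)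
    (hp : ∀ x, p x = true ↔ (x = -l ∨ x = l)) (h1 : a ≤ -l) (h2 : 0 < l) (h3 : l + 1 ≤ b) :
    (PySem.List.pyRange a b 1).filter p = [-l, l] := by
  rw [PySem.List.pyRange_one_append a (-l) b h1 (by omega),
      PySem.List.pyRange_one_append (-l) (-l + 1) b (by omega) (by omega),
      PySem.List.pyRange_one_append (-l + 1) l b (by omega) (by omega),
      PySem.List.pyRange_one_append l (l + 1) b (by omega) (by omega)]
  simp only [List.filter_append]
  have e1 : (PySem.List.pyRange a (-l) 1).filter p = [] := by
    rw [List.filter_eq_nil_iff]; intro x hx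
    rw [PySem.List.mem_pyRange_one] at hx
    simp only [hp]; omega
  have e3 : (PySem.List.pyRange (-l + 1) l 1).filter p = [] := by
    rw [List.filter_eq_nil_iff]; intro x hx
    rw [PySem.List.mem_pyRange_one] at hx
    simp only [hp]; omega
  have e5 : (PySem.List.pyRange (l + 1) b 1).filter p = [] := by
    rw [List.filter_eq_nil_iff]; intro x hx
    rw [PySem.List.mem_pyRange_one] at hx
    simp only [hp]; omega
  have hpl : p (-l) = true := (hp (-l)).mpr (Or.inl rfl)
  have hpr : p l = true := (hp l).mpr (Or.inr rfl)
  simp [e1, e3, e5, hpl, hpr]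

-- B's direct shell construction is the stable filter of A's cube enumeration by layer
lemma shell_eq (s l : Int) (h0 : 0 ≤ l) (hls : l ≤ s) :
    shell l = (cubePts s).filter (fun p => chebLayer p == l) := by
  rw [cubePts]
  simp only [List.filter_flatMap, List.filter_map]
  rw [flatMap_prune s l _ h0 hls (by
    intro i hi
    rw [List.flatMap_eq_nil_iff]
    intro j _
    rw [List.map_eq_nil_iff, List.filter_eq_nil_iff]
    intro k _
    simp only [Function.comp_apply, chebLayer, beq_iff_eq, Int.max_def, Int.abs_eq_natAbs] at *
    split_ifs <;> omega)]
  rw [shell]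
  apply List.flatMap_congr
  intro i hi
  rw [PySem.List.mem_pyRange_one] at hi
  by_cases hil : |i| = l
  · rw [if_pos (beq_iff_eq.mpr hil)]
    rw [flatMap_prune s l _ h0 hls (by
      intro j hj
      rw [List.map_eq_nil_iff, List.filter_eq_nil_iff]
      intro k _
      simp only [Function.comp_apply, chebLayer, beq_iff_eq, Int.max_def, Int.abs_eq_natAbs] at *
      split_ifs <;> omega)]
    apply List.flatMap_congr
    intro j hj
    rw [PySem.List.mem_pyRange_one] at hj
    rw [filter_range_interval (-s) (s + 1) (-l) (l + 1) _ (by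
        intro x
        simp only [Function.comp_apply, chebLayer, beq_iff_eq, Int.max_def, Int.abs_eq_natAbs] at *
        split_ifs <;> omega)
      (by omega) (by omega) (by omega)]
  · rw [if_neg (by simpa using hil)]
    have hil' : |i| < l := by rw [Int.abs_eq_natAbs] at *; omega
    rw [flatMap_prune s l _ h0 hls (by
      intro j hj
      rw [List.map_eq_nil_iff, List.filter_eq_nil_iff]
      intro k _
      simp only [Function.comp_apply, chebLayer, beq_iff_eq, Int.max_def, Int.abs_eq_natAbs] at *
      split_ifs <;> omega)]
    apply List.flatMap_congr
    intro j hj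
    rw [PySem.List.mem_pyRange_one] at hj
    by_cases hjl : |j| = l
    · rw [if_pos (beq_iff_eq.mpr hjl)]
      rw [filter_range_interval (-s) (s + 1) (-l) (l + 1) _ (by
          intro x
          simp only [Function.comp_apply, chebLayer, beq_iff_eq, Int.max_def, Int.abs_eq_natAbs] at *
          split_ifs <;> omega)
        (by omega) (by omega) (by omega)]
    · rw [if_neg (by simpa using hjl)]
      have hjl' : |j| < l := by rw [Int.abs_eq_natAbs] at *; omega
      have hl1 : 0 < l := by rw [Int.abs_eq_natAbs] at hil'; omega
      rw [filter_range_pair (-s) (s + 1) l _ (by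
          intro x
          simp only [Function.comp_apply, chebLayer, beq_iff_eq, Int.max_def, Int.abs_eq_natAbs] at *
          split_ifs <;> omega)
        (by omega) hl1 (by omega)]
      rfl

-- ===== VERDICT (by name: the statement is the Claim_ definition above) =====
theorem BuildBoxedPosList_py_spec : Claim_equal_BuildBoxedPosList_py := by
  intro s _
  unfold Spec_BuildBoxedPosList_py BuildBoxedPosList_py BuildBoxedPosList_py_alt
  by_cases hs : 0 ≤ s
  · have hfold : (PySem.List.pyRange (-s) (s + 1) 1).foldl (fun m i =>
        (PySem.List.pyRange (-s) (s + 1) 1).foldl (fun m j =>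
          (PySem.List.pyRange (-s) (s + 1) 1).foldl (fun m k =>
            stepA m (i, j, k)) m) m) []
        = (cubePts s).foldl stepA [] := by
      simp only [cubePts, List.foldl_flatMap, List.foldl_map]
    rw [hfold, buckets_spec, nBuckets_cube s hs]
    rw [PySem.List.pyRange_one 0 (s + 1)]
    have : (s + 1 - 0).toNat = s.toNat + 1 := by omega
    rw [this, List.map_map]
    refine List.map_congr_left (fun t ht => ?_)
    rw [List.mem_range] at ht
    have h := shell_eq s (t : Int) (by omega) (by omega)
    simp only [Function.comp_apply, zero_add, h]
  · have h1 : PySem.List.pyRange (-s) (s + 1) 1 = [] :=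
      PySem.List.pyRange_one_eq_nil (by omega)
    have h2 : PySem.List.pyRange 0 (s + 1) 1 = [] :=
      PySem.List.pyRange_one_eq_nil (by omega)
    simp [h1, h2]
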